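-- pv_equiv track=rewrite | github.com/Ulysses15/StaticCodeAnalyzer | code_analyzer.py | todo_found_s005
-- ===== SOURCE A (Python) =====
-- import itertools
--
-- def todo_found_s005(string_05):
--     ls = list(map(''.join, itertools.product(*zip('todo'.upper(), 'todo'.lower()))))
--     count = 0
--     if "#" in string_05:
--         for jj in ls:
--             if jj in string_05:
--                 count += 1
--     else:
--         return False
--     if count > 0:
--         return True
-- ===== SOURCE B (Python) =====
-- def todo_found_s005(string_05):
--     # Simpler: guard on '#', then one case-insensitive search instead of
--     # enumerating all 16 case variants of "todo".
--     if "#" not in string_05: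
--         return False
--     if "todo" in string_05.lower():
--         return True
-- ===== Notes on version B (the rewrite author's own statement) =====
-- stated objective: simpler
-- what changed: B drops A's itertools.product generation of all 16 upper/lower case variants of the TODO marker and its counting loop of substring tests, using one guard on the comment character followed by a single case-insensitive membership test on the lowered string, preserving the False/True/None trichotomy.
import Mathlib
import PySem

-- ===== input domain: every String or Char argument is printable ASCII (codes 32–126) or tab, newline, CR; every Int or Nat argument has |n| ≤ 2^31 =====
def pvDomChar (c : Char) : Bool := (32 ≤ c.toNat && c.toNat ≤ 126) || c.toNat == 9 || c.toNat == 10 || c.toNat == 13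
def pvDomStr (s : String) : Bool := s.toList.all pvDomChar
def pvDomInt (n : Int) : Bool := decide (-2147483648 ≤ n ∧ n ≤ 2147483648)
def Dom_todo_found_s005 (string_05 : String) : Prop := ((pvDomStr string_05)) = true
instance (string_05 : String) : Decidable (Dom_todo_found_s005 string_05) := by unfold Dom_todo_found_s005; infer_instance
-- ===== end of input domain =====

-- B replaces A's enumeration of the 16 case variants of "todo" (itertools.product) and its
-- counting loop by one guard on '#' plus a single case-insensitive substring test (simpler).

-- ===== PORT A =====
-- ls = list(map(''.join, itertools.product(*zip('todo'.upper(), 'todo'.lower()))))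
def pvLs : List String :=
  ((List.zip (PySem.Str.upper "todo").toList (PySem.Str.lower "todo").toList).foldr
    (fun p acc => ([p.1, p.2]).flatMap (fun c => acc.map (fun l => c :: l)))
    [([] : List Char)]).map String.ofList

def todo_found_s005 (string_05 : String) : Option Bool :=
  let ls := pvLs
  if PySem.Str.isIn "#" string_05 then
    let count : Int := ls.foldl (fun cnt jj => if PySem.Str.isIn jj string_05 then cnt + 1 else cnt) 0
    if count > 0 then some true else none
  else
    some false

-- ===== PORT B =====
def todo_found_s005_alt (string_05 : String) : Option Bool :=
  if !(PySem.Str.isIn "#" string_05) then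
    some false
  else
    let lowered := PySem.Str.lower string_05
    if PySem.Str.isIn "todo" lowered then some true else none

-- ===== PRECONDITION & SPEC =====
def Spec_todo_found_s005 (string_05 : String) (out : Option Bool) : Prop := out = todo_found_s005_alt string_05
instance (string_05 : String) (out : Option Bool) : Decidable (Spec_todo_found_s005 string_05 out) := by unfold Spec_todo_found_s005; infer_instance

-- ===== CLAIM (what is proved, stated in full; the proofs are below) =====
def Claim_equal_todo_found_s005 : Prop := ∀ (string_05 : String), Dom_todo_found_s005 string_05 → Spec_todo_found_s005 string_05 (todo_found_s005 string_05)

-- ===== LEMMAS AND PROOFS =====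

theorem char_eq_iff_toNat (x y : Char) : x = y ↔ x.toNat = y.toNat := by
  constructor
  · rintro rfl; rfl
  · intro h
    apply Char.ext
    exact UInt32.toNat_inj.mp h

theorem char_le_iff_toNat (x y : Char) : x ≤ y ↔ x.toNat ≤ y.toNat := by
  rw [Char.le_def, UInt32.le_iff_toNat_le]; rfl

-- Python's str.lower on one character hits a given lowercase letter iff the
-- character is that letter or its uppercase partner.
theorem lowerChar_eq_iff (c d D : Char) (hd : D.toNat + 32 = d.toNat)
    (h1 : 65 ≤ D.toNat) (h2 : D.toNat ≤ 90) :
    PySem.Chars.lowerChar c = d ↔ c = d ∨ c = D := by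
  unfold PySem.Chars.lowerChar PySem.Chars.isupper
  have hA : ('A' : Char).toNat = 65 := rfl
  have hZ : ('Z' : Char).toNat = 90 := rfl
  simp only [Bool.and_eq_true, decide_eq_true_eq, char_le_iff_toNat, hA, hZ]
  split
  · rename_i hu
    have hv : (Char.ofNat (c.toNat + 32)).toNat = c.toNat + 32 := by
      rw [Char.toNat_ofNat, if_pos]
      left; omega
    rw [char_eq_iff_toNat, char_eq_iff_toNat c d, char_eq_iff_toNat c D, hv]
    omega
  · rename_i hu
    rw [char_eq_iff_toNat c d, char_eq_iff_toNat c D]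
    omega

-- The 16 case variants of "todo", as char lists, in A's generation order.
def pvLS : List (List Char) :=
  [['T','O','D','O'],['T','O','D','o'],['T','O','d','O'],['T','O','d','o'],
   ['T','o','D','O'],['T','o','D','o'],['T','o','d','O'],['T','o','d','o'],
   ['t','O','D','O'],['t','O','D','o'],['t','O','d','O'],['t','O','d','o'],
   ['t','o','D','O'],['t','o','D','o'],['t','o','d','O'],['t','o','d','o']]

theorem pvLs_eq : pvLs = pvLS.map String.ofList := by decide

theorem map_lower_todo (l : List Char) :
    ('t'::'o'::'d'::'o'::[]) = List.map PySem.Chars.lowerChar l ↔ l ∈ pvLS := by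
  constructor
  · intro h
    have hlen := congrArg List.length h
    simp only [List.length_map, List.length_cons, List.length_nil] at hlen
    rcases l with _ | ⟨a, _ | ⟨b, _ | ⟨c, _ | ⟨d, t⟩⟩⟩⟩ <;>
      simp only [List.length_cons, List.length_nil] at hlen <;> try omega
    have ht : t = [] := by
      have : t.length = 0 := by omega
      exact List.eq_nil_of_length_eq_zero this
    subst ht
    simp only [List.map, List.cons.injEq, and_true] at h
    obtain ⟨h1, h2, h3, h4⟩ := h
    have ha := (lowerChar_eq_iff a 't' 'T' (by decide) (by decide) (by decide)).mp h1.symm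
    have hb := (lowerChar_eq_iff b 'o' 'O' (by decide) (by decide) (by decide)).mp h2.symm
    have hc := (lowerChar_eq_iff c 'd' 'D' (by decide) (by decide) (by decide)).mp h3.symm
    have hd := (lowerChar_eq_iff d 'o' 'O' (by decide) (by decide) (by decide)).mp h4.symm
    clear h1 h2 h3 h4
    rcases ha with rfl | rfl <;> rcases hb with rfl | rfl <;>
      rcases hc with rfl | rfl <;> rcases hd with rfl | rfl <;> decide
  · intro h
    fin_cases h <;> decide

theorem variants_iff (s : String) :
    (∃ jj ∈ pvLs, PySem.Str.isIn jj s = true) ↔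
      PySem.Str.isIn "todo" (PySem.Str.lower s) = true := by
  rw [PySem.Str.isIn_iff_infix, PySem.Str.toList_lower]
  unfold PySem.Chars.lower
  rw [List.infix_map_iff]
  constructor
  · rintro ⟨jj, hmem, hin⟩
    rw [pvLs_eq, List.mem_map] at hmem
    obtain ⟨cl, hcl, rfl⟩ := hmem
    refine ⟨cl, ?_, ?_⟩
    · have := (PySem.Str.isIn_iff_infix _ s).mp hin
      rwa [String.toList_ofList] at this
    · exact (map_lower_todo cl).mpr hcl
  · rintro ⟨cl, hinf, hmap⟩
    have hcl : cl ∈ pvLS := (map_lower_todo cl).mp hmap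
    refine ⟨String.ofList cl, ?_, ?_⟩
    · rw [pvLs_eq, List.mem_map]; exact ⟨cl, hcl, rfl⟩
    · rw [PySem.Str.isIn_iff_infix, String.toList_ofList]; exact hinf

-- ===== VERDICT (by name: the statement is the Claim_ definition above) =====
theorem todo_found_s005_spec : Claim_equal_todo_found_s005 := by
  intro s _
  unfold Spec_todo_found_s005 todo_found_s005 todo_found_s005_alt
  by_cases h : PySem.Str.isIn "#" s = true
  · simp only [h, if_pos, Bool.not_true, Bool.false_eq_true, if_false]
    rw [PySem.List.foldl_if_add_one (fun jj => PySem.Str.isIn jj s) pvLs 0]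
    have hiff : (0 < (pvLs.countP (fun jj => PySem.Str.isIn jj s) : Int)) ↔
        PySem.Str.isIn "todo" (PySem.Str.lower s) = true := by
      rw [← variants_iff s]
      constructor
      · intro hpos
        have : 0 < pvLs.countP (fun jj => PySem.Str.isIn jj s) := by exact_mod_cast hpos
        obtain ⟨jj, hm, hp⟩ := List.countP_pos_iff.mp this
        exact ⟨jj, hm, hp⟩
      · rintro ⟨jj, hm, hp⟩
        have : 0 < pvLs.countP (fun jj => PySem.Str.isIn jj s) :=
          List.countP_pos_iff.mpr ⟨jj, hm, hp⟩
        exact_mod_cast this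
    by_cases h2 : PySem.Str.isIn "todo" (PySem.Str.lower s) = true
    · rw [if_pos (by simpa using hiff.mpr h2), if_pos h2]
    · rw [if_neg (by simpa using fun hpos => h2 (hiff.mp hpos)), if_neg h2]
  · have h' : PySem.Chars.isIn ['#'] s.toList = false := by
      have := eq_false_of_ne_true h
      simpa [PySem.Str.isIn] using this
    simp [h', PySem.Str.isIn]
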